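-- pv_equiv track=rewrite | github.com/qtumproject/qtum-electrum | qtum_electrum/qtum.py | is_hash160
-- ===== SOURCE A (Python) =====
-- def is_hash160(addr):
--     if not addr:
--         return False
--     if not isinstance(addr, str):
--         return False
--     if not len(addr) == 40:
--         return False
--     for char in addr:
--         if (char < '0' or char > '9') and (char < 'A' or char > 'F') and (char < 'a' or char > 'f'):
--             return False
--     return True
-- ===== SOURCE B (Python) =====
-- import re
--
-- _HASH160_RE = re.compile(r'[0-9A-Fa-f]{40}')
--
-- def is_hash160(addr):
--     if not isinstance(addr, str):
--         return False
--     return bool(_HASH160_RE.fullmatch(addr))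
-- ===== Notes on version B (the rewrite author's own statement) =====
-- stated objective: idiomatic
-- what changed: Replaces the explicit length check and per-character range-comparison loop with a single precompiled regex fullmatch r'[0-9A-Fa-f]{40}' that enforces length and hex class at once (the isinstance guard stays, covering None).
import Mathlib
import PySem

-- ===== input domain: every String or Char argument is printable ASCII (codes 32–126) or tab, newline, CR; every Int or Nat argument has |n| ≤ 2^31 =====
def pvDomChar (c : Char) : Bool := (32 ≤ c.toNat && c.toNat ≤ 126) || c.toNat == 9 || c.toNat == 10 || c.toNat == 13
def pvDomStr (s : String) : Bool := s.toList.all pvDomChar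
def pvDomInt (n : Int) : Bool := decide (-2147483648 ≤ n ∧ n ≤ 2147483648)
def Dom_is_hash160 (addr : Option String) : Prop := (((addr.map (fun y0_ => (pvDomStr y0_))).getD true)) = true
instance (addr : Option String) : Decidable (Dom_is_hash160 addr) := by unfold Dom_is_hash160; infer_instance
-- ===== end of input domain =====

-- B replaces A's explicit length check and per-character range loop with a single regex fullmatch ([0-9A-Fa-f]{40}); idiomatic, same cost.
-- ===== PORT A =====
-- loop over the characters: returns false at the first non-hex char, as A's for-loop does
def isHash160LoopA : List Char → Bool
  | [] => true
  | c :: rest =>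
      if (c < '0' || c > '9') && (c < 'A' || c > 'F') && (c < 'a' || c > 'f') then false
      else isHash160LoopA rest

def is_hash160 (addr : Option String) : Bool :=
  match addr with
  | none => false                                   -- `not addr` on None
  | some s =>
      if s.toList.isEmpty then false                -- `not addr` on ''
      else if !(s.toList.length == 40) then false
      else isHash160LoopA s.toList

-- ===== PORT B =====
-- regex class [0-9A-Fa-f]
def isHexCharB (c : Char) : Bool :=
  ('0' ≤ c && c ≤ '9') || ('A' ≤ c && c ≤ 'F') || ('a' ≤ c && c ≤ 'f')

-- fullmatch of r'[0-9A-Fa-f]{40}': length 40 and every char in the class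
def is_hash160_alt (addr : Option String) : Bool :=
  match addr with
  | none => false                                   -- isinstance guard
  | some s => s.toList.length == 40 && s.toList.all isHexCharB

-- ===== PRECONDITION & SPEC =====
def Spec_is_hash160 (addr : Option String) (out : Bool) : Prop := out = is_hash160_alt addr
instance (addr : Option String) (out : Bool) : Decidable (Spec_is_hash160 addr out) := by unfold Spec_is_hash160; infer_instance

-- ===== CLAIM (what is proved, stated in full; the proofs are below) =====
def Claim_equal_is_hash160 : Prop := ∀ (addr : Option String), Dom_is_hash160 addr → Spec_is_hash160 addr (is_hash160 addr)

-- ===== LEMMAS AND PROOFS =====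
theorem cond_eq_not_hex (c : Char) :
    ((c < '0' || c > '9') && (c < 'A' || c > 'F') && (c < 'a' || c > 'f')) = !isHexCharB c := by
  simp [isHexCharB, Bool.not_or, Bool.not_and, ← decide_not, not_le, gt_iff_lt, Bool.and_assoc]

theorem loopA_eq_all (cs : List Char) : isHash160LoopA cs = cs.all isHexCharB := by
  induction cs with
  | nil => rfl
  | cons c rest ih =>
      simp only [isHash160LoopA, List.all_cons, cond_eq_not_hex]
      cases hb : isHexCharB c <;> simp [hb, ih]

-- ===== VERDICT (by name: the statement is the Claim_ definition above) =====
theorem is_hash160_spec : Claim_equal_is_hash160 := by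
  intro addr _
  unfold Spec_is_hash160
  match addr with
  | none => rfl
  | some s =>
      simp only [is_hash160, is_hash160_alt]
      by_cases hE : s.toList.isEmpty
      · have : s.toList.length = 0 := by simpa [List.isEmpty_iff_length_eq_zero] using hE
        simp [hE, this]
      · by_cases hL : s.toList.length = 40
        · simp [hE, hL, loopA_eq_all]
        · have hL2 : s.length ≠ 40 := fun h => hL (by rw [String.length_toList]; exact h)
          simp [hE, hL2]
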